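-- pv_equiv track=rewrite | github.com/CosminHorjea/fmi | Sem I/Programarea Algoritmilor/laboratoare/lab7/problema4.py | sir_max
-- ===== SOURCE A (Python) =====
-- def sir_max(siruri,k):
-- 	ok=0
-- 	if(len(siruri)==1):
-- 		for el in siruri[0]:
-- 			if(el==k):
-- 				return True
-- 		return False
--
-- 	for el in siruri[-1]:
-- 		if(k<el):
-- 			continue
-- 		ok=ok or sir_max(siruri[:-1],k-el)
-- 	return ok
-- ===== SOURCE B (Python) =====
-- def sir_max(siruri, k):
--     first, rest = siruri[0], siruri[1:]
--     targets = {k}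
--     for lst in reversed(rest):
--         targets = {t - el for t in targets for el in lst if el <= t}
--     return any(el in targets for el in first)
-- ===== Notes on version B (the rewrite author's own statement) =====
-- stated objective: alternative
-- what changed: Replaces A's recursion over one-element-per-list choices by an iterative DP that carries the set of remaining targets from the last list down to the first and ends with a membership test against the first list; same pruning rule, different traversal and state.
-- outside the precondition, e.g. on sir_max([], 0): A raises IndexError, B raises IndexError; on sir_max([[], [0]], -1): A returns 0, B returns False; on sir_max([[1], [2]], 0): A returns 0, B returns False
import Mathlib
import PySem

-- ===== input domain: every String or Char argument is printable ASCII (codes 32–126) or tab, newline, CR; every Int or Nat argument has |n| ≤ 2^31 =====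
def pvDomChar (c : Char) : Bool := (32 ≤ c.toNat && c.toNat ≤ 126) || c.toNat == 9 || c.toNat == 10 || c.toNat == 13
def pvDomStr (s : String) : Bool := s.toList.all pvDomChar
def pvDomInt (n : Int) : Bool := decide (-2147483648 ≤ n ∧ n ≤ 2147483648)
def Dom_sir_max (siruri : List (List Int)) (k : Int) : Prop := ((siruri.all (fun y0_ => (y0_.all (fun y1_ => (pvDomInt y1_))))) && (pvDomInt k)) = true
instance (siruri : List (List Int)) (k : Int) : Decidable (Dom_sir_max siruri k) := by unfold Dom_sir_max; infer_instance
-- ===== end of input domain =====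

-- B replaces A's per-branch recursion by an iterative set-of-remaining-targets DP (alternative algorithm); A=B proved wherever A returns a bool.

-- ===== PORT A =====
-- literal transliteration of A: base case = linear scan of the single list,
-- otherwise a loop over the last list accumulating `ok` with a recursive call on siruri[:-1].
def sir_max (siruri : List (List Int)) (k : Int) : Bool :=
  match siruri with
  | [] => false  -- Python raises IndexError here (siruri[-1] on []); excluded by Pre_
  | [l] => l.any (fun el => el == k)   -- for el in siruri[0]: if el==k: return True / return False
  | l1 :: l2 :: rest =>
      ((l1 :: l2 :: rest).getLast (by simp)).foldl
        (fun ok el => if k < el then ok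
          else ok || sir_max ((l1 :: l2 :: rest).dropLast) (k - el)) false
termination_by siruri.length
decreasing_by simp [List.length_dropLast]

-- ===== PORT B =====
-- transliteration of Source B: fold reversed(rest) carrying the set of remaining targets, then membership test against the first list.
def sir_max_alt (siruri : List (List Int)) (k : Int) : Bool :=
  match siruri with
  | [] => false  -- Python raises IndexError here (siruri[0] on []); excluded by Pre_
  | first :: rest =>
      let targets : PySem.Set Int :=
        rest.reverse.foldl
          (fun ts lst => PySem.Set.ofList
            (ts.flatMap (fun t => (lst.filter (fun el => decide (el ≤ t))).map (fun el => t - el))))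
          (PySem.Set.ofList [k])
      first.any (fun el => PySem.Set.contains targets el)

-- ===== PRECONDITION & SPEC =====
-- common semantic skeleton: pick one element per list of rs (processed front to back,
-- with A's pruning rule el ≤ current target), ending with a membership test in `first`.
def good (rs : List (List Int)) (first : List Int) (k : Int) : Bool :=
  match rs with
  | [] => first.any (fun el => el == k)
  | l :: rs' => l.any (fun el => decide (el ≤ k) && good rs' first (k - el))

-- pvChain rs k: A's untyped accumulator ends up a bool on a false answer iff, processing the
-- lists after the first from the last one down, every list has an element ≤ the remaining target
-- (the LAST such element is the one whose recursive result A's `ok` keeps).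
def pvChain (rs : List (List Int)) (k : Int) : Bool :=
  match rs with
  | [] => true
  | l :: rs' =>
      match (l.filter (fun el => decide (el ≤ k))).getLast? with
      | none => false
      | some el => pvChain rs' (k - el)

-- Pre_ excludes the empty list of lists, where A raises IndexError, and the inputs on which A's
-- accumulator `ok` (initialised to the int 0) is returned unassigned-or-propagated as the int 0
-- instead of the bool False — the declared return type bool forces exactly those out.
def Pre_sir_max (siruri : List (List Int)) (k : Int) : Prop :=
  siruri ≠ [] ∧
    (good siruri.tail.reverse (siruri.headD []) k || pvChain siruri.tail.reverse k) = true
instance (siruri : List (List Int)) (k : Int) : Decidable (Pre_sir_max siruri k) := by unfold Pre_sir_max; infer_instance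
def pvWitness_sir_max : List (List Int) × Int := ([[1, 2], [3]], 4)

def Spec_sir_max (siruri : List (List Int)) (k : Int) (out : Bool) : Prop := out = sir_max_alt siruri k
instance (siruri : List (List Int)) (k : Int) (out : Bool) : Decidable (Spec_sir_max siruri k out) := by unfold Spec_sir_max; infer_instance

-- ===== CLAIM (what is proved, stated in full; the proofs are below) =====
def Claim_equal_sir_max : Prop := ∀ (siruri : List (List Int)) (k : Int), Dom_sir_max siruri k → Pre_sir_max siruri k → Spec_sir_max siruri k (sir_max siruri k)

-- ===== LEMMAS AND PROOFS =====

lemma foldl_or_prune (l : List Int) (f : Int → Bool) (k : Int) (b : Bool) :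
    l.foldl (fun ok el => if k < el then ok else ok || f el) b
      = (b || l.any (fun el => decide (el ≤ k) && f el)) := by
  induction l generalizing b with
  | nil => simp
  | cons el t ih =>
    simp only [List.foldl_cons, List.any_cons, ih]
    by_cases h : k < el
    · simp [h, show ¬ el ≤ k by omega]
    · simp [h, show el ≤ k by omega, Bool.or_assoc]

lemma sir_max_snoc (ls : List (List Int)) (hl : ls ≠ []) (l : List Int) (k : Int) :
    sir_max (ls ++ [l]) k
      = l.foldl (fun ok el => if k < el then ok else ok || sir_max ls (k - el)) false := by
  match ls with
  | [] => exact absurd rfl hl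
  | [a] => simp [sir_max]
  | a :: b :: t =>
    rw [show (a :: b :: t) ++ [l] = a :: b :: (t ++ [l]) by simp, sir_max]
    rw [show (a :: b :: (t ++ [l])).getLast (by simp) = l by
          simpa using List.getLast_append (l₁ := a :: b :: t) (l₂ := [l]) (by simp)]
    rw [show (a :: b :: (t ++ [l])).dropLast = a :: b :: t by
          rw [show a :: b :: (t ++ [l]) = (a :: b :: t) ++ [l] by simp, List.dropLast_concat]]

lemma sir_max_eq_good (rs : List (List Int)) (first : List Int) (k : Int) :
    sir_max (first :: rs.reverse) k = good rs first k := by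
  induction rs generalizing k with
  | nil => simp [sir_max, good]
  | cons l rs' ih =>
    have h : first :: (l :: rs').reverse = (first :: rs'.reverse) ++ [l] := by simp
    rw [h, sir_max_snoc _ (by simp) _ _, foldl_or_prune, good]
    simp only [Bool.false_or, ih]

lemma any_contains_comm (first : List Int) (S : List Int) :
    first.any (fun el => PySem.Set.contains S el)
      = S.any (fun t => first.any (fun el => el == t)) := by
  rw [Bool.eq_iff_iff]
  simp only [List.any_eq_true, PySem.Set.contains_iff, beq_iff_eq]
  constructor
  · rintro ⟨a, ha, hs⟩; exact ⟨a, hs, a, ha, rfl⟩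
  · rintro ⟨t, ht, a, ha, rfl⟩; exact ⟨a, ha, ht⟩

lemma any_ofList {p : Int → Bool} (L : List Int) :
    (PySem.Set.ofList L).any p = L.any p := by
  rw [Bool.eq_iff_iff]
  simp only [List.any_eq_true, PySem.Set.mem_ofList]

lemma alt_fold_eq_good (rs : List (List Int)) (first : List Int) (S : List Int) :
    first.any (fun el => PySem.Set.contains
      (rs.foldl (fun ts lst => PySem.Set.ofList
        (ts.flatMap (fun t => (lst.filter (fun el => decide (el ≤ t))).map (fun el => t - el)))) S) el)
      = S.any (fun t => good rs first t) := by
  induction rs generalizing S with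
  | nil => simpa [good] using any_contains_comm first S
  | cons l rs' ih =>
    simp only [List.foldl_cons]
    rw [ih, any_ofList, List.any_flatMap]
    refine congrArg S.any (funext fun t => ?_)
    rw [good, List.any_map, List.any_filter]
    simp [Function.comp]

-- ===== VERDICT (by name: the statement is the Claim_ definition above) =====
theorem sir_max_spec : Claim_equal_sir_max := by
  intro siruri k _ hpre
  obtain ⟨hpre, -⟩ := hpre
  unfold Spec_sir_max
  match siruri with
  | [] => exact absurd rfl hpre
  | first :: rest =>
    show sir_max (first :: rest) k = sir_max_alt (first :: rest) k
    rw [sir_max_alt]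
    have h1 : sir_max (first :: rest) k = good rest.reverse first k := by
      have := sir_max_eq_good rest.reverse first k
      rwa [List.reverse_reverse] at this
    have h2 := alt_fold_eq_good rest.reverse first (PySem.Set.ofList [k])
    rw [h1, h2]
    simp [PySem.Set.ofList, PySem.Set.add, PySem.Set.contains]
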